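-- pv_equiv track=rewrite | github.com/Icecreammane/ross-golf-dashboard | scripts/opportunity_aggregator.py | _detect_email_type
-- ===== SOURCE A (Python) =====
-- def _detect_email_type(subject: str, content: str) -> str:
--     """Detect opportunity type from email"""
--     text = f"{subject} {content}".lower()
--
--     # Check for golf coaching (highest priority)
--     if any(kw in text for kw in ['golf', 'swing', 'putting', 'handicap', 'course']):
--         if any(kw in text for kw in ['coach', 'lesson', 'help', 'teach', 'improve']):
--             return 'golf_coaching'
--
--     # Check for coaching
--     if any(kw in text for kw in ['coach', 'coaching', 'mentor', 'consulting']):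
--         return 'coaching'
--
--     # Check for partnership
--     if any(kw in text for kw in ['partner', 'partnership', 'collaborate', 'work together']):
--         return 'partnership'
--
--     # Check for feedback
--     if any(kw in text for kw in ['feedback', 'review', 'suggestion', 'feature']):
--         return 'product_feedback'
--
--     return 'general'
-- ===== SOURCE B (Python) =====
-- # Single-pass multi-pattern scan: walk the text once, at each position record the
-- # category flags of every keyword starting there, then decide the label from the flags.
-- KEYWORD_FLAGS = {
--     'golf': {'G'}, 'swing': {'G'}, 'putting': {'G'}, 'handicap': {'G'}, 'course': {'G'},
--     'coach': {'L', 'C'}, 'lesson': {'L'}, 'help': {'L'}, 'teach': {'L'}, 'improve': {'L'},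
--     'coaching': {'C'}, 'mentor': {'C'}, 'consulting': {'C'},
--     'partner': {'P'}, 'partnership': {'P'}, 'collaborate': {'P'}, 'work together': {'P'},
--     'feedback': {'F'}, 'review': {'F'}, 'suggestion': {'F'}, 'feature': {'F'},
-- }
--
--
-- def _detect_email_type(subject: str, content: str) -> str:
--     text = f"{subject} {content}".lower()
--     hits = set()
--     for i in range(len(text)):
--         for kw, flags in KEYWORD_FLAGS.items():
--             if text.startswith(kw, i):
--                 hits |= flags
--     if 'G' in hits and 'L' in hits:
--         return 'golf_coaching'
--     if 'C' in hits:
--         return 'coaching'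
--     if 'P' in hits:
--         return 'partnership'
--     if 'F' in hits:
--         return 'product_feedback'
--     return 'general'
-- ===== Notes on version B (the rewrite author's own statement) =====
-- stated objective: alternative
-- what changed: Replaced A's per-keyword substring searches in an if-cascade by a single left-to-right scan of the text that, at each position, records the category flags of every keyword starting there into one hit-set, with the label decided afterwards from the accumulated flags.
import Mathlib
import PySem

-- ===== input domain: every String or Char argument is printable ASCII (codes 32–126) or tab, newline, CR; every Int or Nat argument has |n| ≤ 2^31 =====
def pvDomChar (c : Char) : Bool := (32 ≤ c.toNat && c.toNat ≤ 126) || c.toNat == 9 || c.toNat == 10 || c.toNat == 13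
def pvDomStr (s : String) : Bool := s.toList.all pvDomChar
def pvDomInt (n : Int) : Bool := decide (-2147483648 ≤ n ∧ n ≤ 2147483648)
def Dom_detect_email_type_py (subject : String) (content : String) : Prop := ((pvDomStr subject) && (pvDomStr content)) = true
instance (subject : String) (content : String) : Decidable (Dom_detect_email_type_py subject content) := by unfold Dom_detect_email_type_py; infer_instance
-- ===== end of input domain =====

-- B replaces A's per-keyword substring searches by one left-to-right scan of the text
-- accumulating category flags in a hit-set, deciding the label afterwards (alternative; same cost).

-- ===== PORT A =====
def detect_email_type_py (subject : String) (content : String) : String :=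
  let text := PySem.Str.lower (subject ++ " " ++ content)
  if ["golf", "swing", "putting", "handicap", "course"].any (fun kw => PySem.Str.isIn kw text) then
    if ["coach", "lesson", "help", "teach", "improve"].any (fun kw => PySem.Str.isIn kw text) then
      "golf_coaching"
    else if ["coach", "coaching", "mentor", "consulting"].any (fun kw => PySem.Str.isIn kw text) then
      "coaching"
    else if ["partner", "partnership", "collaborate", "work together"].any (fun kw => PySem.Str.isIn kw text) then
      "partnership"
    else if ["feedback", "review", "suggestion", "feature"].any (fun kw => PySem.Str.isIn kw text) then
      "product_feedback"
    else
      "general"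
  else if ["coach", "coaching", "mentor", "consulting"].any (fun kw => PySem.Str.isIn kw text) then
    "coaching"
  else if ["partner", "partnership", "collaborate", "work together"].any (fun kw => PySem.Str.isIn kw text) then
    "partnership"
  else if ["feedback", "review", "suggestion", "feature"].any (fun kw => PySem.Str.isIn kw text) then
    "product_feedback"
  else
    "general"

-- ===== PORT B =====
-- the KEYWORD_FLAGS dict: keyword → set of category flags
def pvKeywordFlags : List (String × PySem.Set String) :=
  [("golf", ["G"]), ("swing", ["G"]), ("putting", ["G"]), ("handicap", ["G"]), ("course", ["G"]),
   ("coach", ["L", "C"]), ("lesson", ["L"]), ("help", ["L"]), ("teach", ["L"]), ("improve", ["L"]),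
   ("coaching", ["C"]), ("mentor", ["C"]), ("consulting", ["C"]),
   ("partner", ["P"]), ("partnership", ["P"]), ("collaborate", ["P"]), ("work together", ["P"]),
   ("feedback", ["F"]), ("review", ["F"]), ("suggestion", ["F"]), ("feature", ["F"])]

-- inner loop at one position: text.startswith(kw, i) is 'kw prefix of the suffix at i'
def pvStep (s : List Char) (hits : PySem.Set String) : PySem.Set String :=
  pvKeywordFlags.foldl
    (fun h kf => if kf.1.toList.isPrefixOf s then PySem.Set.union h kf.2 else h) hits

-- outer loop over the positions of text (each suffix in turn)
def pvScan : List Char → PySem.Set String → PySem.Set String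
  | [], hits => hits
  | a :: rest, hits => pvScan rest (pvStep (a :: rest) hits)

def detect_email_type_py_alt (subject : String) (content : String) : String :=
  let text := PySem.Str.lower (subject ++ " " ++ content)
  let hits := pvScan text.toList PySem.Set.empty
  if PySem.Set.contains hits "G" && PySem.Set.contains hits "L" then "golf_coaching"
  else if PySem.Set.contains hits "C" then "coaching"
  else if PySem.Set.contains hits "P" then "partnership"
  else if PySem.Set.contains hits "F" then "product_feedback"
  else "general"

-- ===== PRECONDITION & SPEC =====
def Spec_detect_email_type_py (subject : String) (content : String) (out : String) : Prop := out = detect_email_type_py_alt subject content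
instance (subject : String) (content : String) (out : String) : Decidable (Spec_detect_email_type_py subject content out) := by unfold Spec_detect_email_type_py; infer_instance

-- ===== CLAIM =====
def Claim_equal_detect_email_type_py : Prop := ∀ (subject : String) (content : String), Dom_detect_email_type_py subject content → Spec_detect_email_type_py subject content (detect_email_type_py subject content)

-- ===== LEMMAS AND PROOFS =====

theorem mem_pvStep_foldl (s : List Char) (f : String)
    (l : List (String × PySem.Set String)) (hits : PySem.Set String) :
    (f ∈ l.foldl
        (fun h kf => if kf.1.toList.isPrefixOf s then PySem.Set.union h kf.2 else h) hits) ↔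
      f ∈ hits ∨ ∃ kf ∈ l, kf.1.toList <+: s ∧ f ∈ kf.2 := by
  induction l generalizing hits with
  | nil => simp
  | cons kf rest ih =>
    simp only [List.foldl_cons]
    by_cases hp : kf.1.toList.isPrefixOf s
    · rw [if_pos hp, ih]
      simp only [PySem.Set.mem_union, List.mem_cons]
      have hpre : kf.1.toList <+: s := List.isPrefixOf_iff_prefix.mp hp
      constructor
      · rintro ((h | h) | ⟨x, hx, h1, h2⟩)
        · exact Or.inl h
        · exact Or.inr ⟨kf, Or.inl rfl, hpre, h⟩
        · exact Or.inr ⟨x, Or.inr hx, h1, h2⟩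
      · rintro (h | ⟨x, (rfl | hx), h1, h2⟩)
        · exact Or.inl (Or.inl h)
        · exact Or.inl (Or.inr h2)
        · exact Or.inr ⟨x, hx, h1, h2⟩
    · rw [if_neg hp, ih]
      have hpre : ¬ kf.1.toList <+: s := fun h => hp (List.isPrefixOf_iff_prefix.mpr h)
      simp only [List.mem_cons]
      constructor
      · rintro (h | ⟨x, hx, h1, h2⟩)
        · exact Or.inl h
        · exact Or.inr ⟨x, Or.inr hx, h1, h2⟩
      · rintro (h | ⟨x, (rfl | hx), h1, h2⟩)
        · exact Or.inl h
        · exact absurd h1 hpre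
        · exact Or.inr ⟨x, hx, h1, h2⟩

theorem mem_pvScan (s : List Char) (f : String) (hits : PySem.Set String)
    (hne : ∀ kf ∈ pvKeywordFlags, kf.1.toList ≠ []) :
    f ∈ pvScan s hits ↔ f ∈ hits ∨ ∃ kf ∈ pvKeywordFlags, kf.1.toList <:+: s ∧ f ∈ kf.2 := by
  induction s generalizing hits with
  | nil =>
    simp only [pvScan]
    constructor
    · exact Or.inl
    · rintro (h | ⟨kf, hkf, hinf, _⟩)
      · exact h
      · exact absurd (List.eq_nil_of_infix_nil hinf) (hne kf hkf)
  | cons a rest ih =>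
    simp only [pvScan]
    rw [ih, pvStep, mem_pvStep_foldl]
    constructor
    · rintro ((h | ⟨kf, hkf, h1, h2⟩) | ⟨kf, hkf, h1, h2⟩)
      · exact Or.inl h
      · exact Or.inr ⟨kf, hkf, h1.isInfix, h2⟩
      · exact Or.inr ⟨kf, hkf, h1.trans (List.infix_cons (List.infix_refl rest)), h2⟩
    · rintro (h | ⟨kf, hkf, h1, h2⟩)
      · exact Or.inl (Or.inl h)
      · rcases List.infix_cons_iff.mp h1 with hp | hi
        · exact Or.inl (Or.inr ⟨kf, hkf, hp, h2⟩)
        · exact Or.inr ⟨kf, hkf, hi, h2⟩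

theorem pv_ne_nil : ∀ kf ∈ pvKeywordFlags, kf.1.toList ≠ [] := by decide

theorem contains_scan (f : String) (t : List Char) :
    PySem.Set.contains (pvScan t PySem.Set.empty) f = true ↔
      ∃ kf ∈ pvKeywordFlags, kf.1.toList <:+: t ∧ f ∈ kf.2 := by
  rw [PySem.Set.contains_iff, mem_pvScan t f PySem.Set.empty pv_ne_nil]
  simp [PySem.Set.empty]

theorem flag_eq_any (f : String) (kws : List String) (t : List Char)
    (hiff : (∃ kf ∈ pvKeywordFlags, kf.1.toList <:+: t ∧ f ∈ kf.2) ↔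
            ∃ kw ∈ kws, kw.toList <:+: t) :
    PySem.Set.contains (pvScan t PySem.Set.empty) f =
      kws.any (fun kw => PySem.Chars.isIn kw.toList t) := by
  rw [Bool.eq_iff_iff, contains_scan, hiff]
  simp [List.any_eq_true, PySem.Chars.isIn_iff_infix]

theorem flag_G (t : List Char) :
    PySem.Set.contains (pvScan t PySem.Set.empty) "G" =
      ["golf", "swing", "putting", "handicap", "course"].any (fun kw => PySem.Chars.isIn kw.toList t) := by
  apply flag_eq_any
  simp only [pvKeywordFlags, List.mem_cons, List.mem_nil_iff]
  constructor
  · rintro ⟨kf, hkf, h1, h2⟩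
    rcases hkf with rfl|rfl|rfl|rfl|rfl|rfl|rfl|rfl|rfl|rfl|rfl|rfl|rfl|rfl|rfl|rfl|rfl|rfl|rfl|rfl|rfl|h
    all_goals first
      | cases h
      | (simp at h2; done)
      | (simp at h2; exact ⟨_, by simp, h1⟩)
  · rintro ⟨kw, hkw, h1⟩
    rcases hkw with rfl|rfl|rfl|rfl|rfl|h
    · exact ⟨("golf", ["G"]), by simp, h1, by decide⟩
    · exact ⟨("swing", ["G"]), by simp, h1, by decide⟩
    · exact ⟨("putting", ["G"]), by simp, h1, by decide⟩
    · exact ⟨("handicap", ["G"]), by simp, h1, by decide⟩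
    · exact ⟨("course", ["G"]), by simp, h1, by decide⟩
    · cases h

theorem flag_L (t : List Char) :
    PySem.Set.contains (pvScan t PySem.Set.empty) "L" =
      ["coach", "lesson", "help", "teach", "improve"].any (fun kw => PySem.Chars.isIn kw.toList t) := by
  apply flag_eq_any
  simp only [pvKeywordFlags, List.mem_cons, List.mem_nil_iff]
  constructor
  · rintro ⟨kf, hkf, h1, h2⟩
    rcases hkf with rfl|rfl|rfl|rfl|rfl|rfl|rfl|rfl|rfl|rfl|rfl|rfl|rfl|rfl|rfl|rfl|rfl|rfl|rfl|rfl|rfl|h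
    all_goals first
      | cases h
      | (simp at h2; done)
      | (simp at h2; exact ⟨_, by simp, h1⟩)
  · rintro ⟨kw, hkw, h1⟩
    rcases hkw with rfl|rfl|rfl|rfl|rfl|h
    · exact ⟨("coach", ["L", "C"]), by simp, h1, by decide⟩
    · exact ⟨("lesson", ["L"]), by simp, h1, by decide⟩
    · exact ⟨("help", ["L"]), by simp, h1, by decide⟩
    · exact ⟨("teach", ["L"]), by simp, h1, by decide⟩
    · exact ⟨("improve", ["L"]), by simp, h1, by decide⟩
    · cases h

theorem flag_C (t : List Char) :
    PySem.Set.contains (pvScan t PySem.Set.empty) "C" =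
      ["coach", "coaching", "mentor", "consulting"].any (fun kw => PySem.Chars.isIn kw.toList t) := by
  apply flag_eq_any
  simp only [pvKeywordFlags, List.mem_cons, List.mem_nil_iff]
  constructor
  · rintro ⟨kf, hkf, h1, h2⟩
    rcases hkf with rfl|rfl|rfl|rfl|rfl|rfl|rfl|rfl|rfl|rfl|rfl|rfl|rfl|rfl|rfl|rfl|rfl|rfl|rfl|rfl|rfl|h
    all_goals first
      | cases h
      | (simp at h2; done)
      | (simp at h2; exact ⟨_, by simp, h1⟩)
  · rintro ⟨kw, hkw, h1⟩
    rcases hkw with rfl|rfl|rfl|rfl|h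
    · exact ⟨("coach", ["L", "C"]), by simp, h1, by decide⟩
    · exact ⟨("coaching", ["C"]), by simp, h1, by decide⟩
    · exact ⟨("mentor", ["C"]), by simp, h1, by decide⟩
    · exact ⟨("consulting", ["C"]), by simp, h1, by decide⟩
    · cases h

theorem flag_P (t : List Char) :
    PySem.Set.contains (pvScan t PySem.Set.empty) "P" =
      ["partner", "partnership", "collaborate", "work together"].any (fun kw => PySem.Chars.isIn kw.toList t) := by
  apply flag_eq_any
  simp only [pvKeywordFlags, List.mem_cons, List.mem_nil_iff]
  constructor
  · rintro ⟨kf, hkf, h1, h2⟩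
    rcases hkf with rfl|rfl|rfl|rfl|rfl|rfl|rfl|rfl|rfl|rfl|rfl|rfl|rfl|rfl|rfl|rfl|rfl|rfl|rfl|rfl|rfl|h
    all_goals first
      | cases h
      | (simp at h2; done)
      | (simp at h2; exact ⟨_, by simp, h1⟩)
  · rintro ⟨kw, hkw, h1⟩
    rcases hkw with rfl|rfl|rfl|rfl|h
    · exact ⟨("partner", ["P"]), by simp, h1, by decide⟩
    · exact ⟨("partnership", ["P"]), by simp, h1, by decide⟩
    · exact ⟨("collaborate", ["P"]), by simp, h1, by decide⟩
    · exact ⟨("work together", ["P"]), by simp, h1, by decide⟩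
    · cases h

theorem flag_F (t : List Char) :
    PySem.Set.contains (pvScan t PySem.Set.empty) "F" =
      ["feedback", "review", "suggestion", "feature"].any (fun kw => PySem.Chars.isIn kw.toList t) := by
  apply flag_eq_any
  simp only [pvKeywordFlags, List.mem_cons, List.mem_nil_iff]
  constructor
  · rintro ⟨kf, hkf, h1, h2⟩
    rcases hkf with rfl|rfl|rfl|rfl|rfl|rfl|rfl|rfl|rfl|rfl|rfl|rfl|rfl|rfl|rfl|rfl|rfl|rfl|rfl|rfl|rfl|h
    all_goals first
      | cases h
      | (simp at h2; done)
      | (simp at h2; exact ⟨_, by simp, h1⟩)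
  · rintro ⟨kw, hkw, h1⟩
    rcases hkw with rfl|rfl|rfl|rfl|h
    · exact ⟨("feedback", ["F"]), by simp, h1, by decide⟩
    · exact ⟨("review", ["F"]), by simp, h1, by decide⟩
    · exact ⟨("suggestion", ["F"]), by simp, h1, by decide⟩
    · exact ⟨("feature", ["F"]), by simp, h1, by decide⟩
    · cases h

theorem str_isIn_eq_chars (kw t : String) :
    PySem.Str.isIn kw t = PySem.Chars.isIn kw.toList t.toList := by
  simp [PySem.Str.isIn]

-- ===== VERDICT =====
theorem detect_email_type_py_spec : Claim_equal_detect_email_type_py := by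
  intro subject content _
  unfold Spec_detect_email_type_py detect_email_type_py detect_email_type_py_alt
  simp only [str_isIn_eq_chars, flag_G, flag_L, flag_C, flag_P, flag_F]
  generalize (["golf", "swing", "putting", "handicap", "course"].any _) = b1
  generalize (["coach", "lesson", "help", "teach", "improve"].any _) = b2
  generalize (["coach", "coaching", "mentor", "consulting"].any _) = b3
  generalize (["partner", "partnership", "collaborate", "work together"].any _) = b4
  generalize (["feedback", "review", "suggestion", "feature"].any _) = b5
  cases b1 <;> cases b2 <;> cases b3 <;> cases b4 <;> cases b5 <;> rfl
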